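-- pv_equiv track=rewrite | github.com/hari01584/aiseo-ai-founding-engg-assignment | app/services/aeo_checks/htag_hierarchy.py | validate_htags
-- ===== SOURCE A (Python) =====
-- from typing import List, Optional
--
-- def validate_htags(htags: List[str]) -> List[str]:
--     violations: List[str] = []
--
--     if not htags:
--         violations.append("No heading tags found in the content.")
--         return violations
--
--     h1_count = htags.count("h1")
--
--     # Rule 1 — exactly one H1
--     if h1_count == 0:
--         violations.append(
--             "No <h1> tag found. Every page must have exactly one <h1>."
--         )
--     elif h1_count > 1:
--         violations.append(
--             f"Found {h1_count} <h1> tags. There must be exactly one <h1> per page."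
--         )
--
--     # Index of the first h1 (default to end so pre-h1 loop is skipped if missing)
--     first_h1_idx = next(
--         (i for i, t in enumerate(htags) if t == "h1"), len(htags)
--     )
--
--     # Rule 3 — no h-tag before the first H1
--     for i, tag in enumerate(htags[:first_h1_idx]):
--         violations.append(
--             f"<{tag}> at position {i + 1} appears before the <h1>. "
--             "All headings should follow the page's single <h1>."
--         )
--
--     # Rule 2 — no level skipped (walk from first H1 onward)
--     prev_level: Optional[int] = None
--     for tag in htags[first_h1_idx:]:
--         current = int(tag[1])
--         if prev_level is not None and current > prev_level + 1:
--             violations.append(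
--                 f"Heading level skipped: <h{prev_level}> followed directly by "
--                 f"<h{current}> — level <h{prev_level + 1}> is missing."
--             )
--         prev_level = current
--
--     return violations
-- ===== SOURCE B (Python) =====
-- from typing import List, Optional
--
-- def validate_htags(htags: List[str]) -> List[str]:
--     # One pass: count h1s, buffer pre-h1 messages and level-skip messages
--     # simultaneously, then assemble in A's order (h1-count, pre-h1, skips).
--     if not htags:
--         return ["No heading tags found in the content."]
--
--     h1_count = 0
--     pre_h1: List[str] = []
--     skips: List[str] = []
--     prev: Optional[int] = None
--     for i, tag in enumerate(htags):
--         if tag == "h1":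
--             h1_count += 1
--         if h1_count == 0:
--             pre_h1.append(
--                 f"<{tag}> at position {i + 1} appears before the <h1>. "
--                 "All headings should follow the page's single <h1>."
--             )
--         else:
--             current = int(tag[1])
--             if prev is not None and current > prev + 1:
--                 skips.append(
--                     f"Heading level skipped: <h{prev}> followed directly by "
--                     f"<h{current}> — level <h{prev + 1}> is missing."
--                 )
--             prev = current
--
--     head: List[str] = []
--     if h1_count == 0:
--         head.append("No <h1> tag found. Every page must have exactly one <h1>.")
--     elif h1_count > 1:
--         head.append(f"Found {h1_count} <h1> tags. There must be exactly one <h1> per page.")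
--     return head + pre_h1 + skips
-- ===== Notes on version B (the rewrite author's own statement) =====
-- stated objective: alternative
-- what changed: B replaces A's four sequential passes (count of h1s, first-h1 index search, pre-h1 slice loop, level-skip slice loop) by a single pass over htags that simultaneously maintains the h1 count, a pre-h1 message buffer and a level-skip message buffer, assembling the violation list at the end in A's order.
import Mathlib
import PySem

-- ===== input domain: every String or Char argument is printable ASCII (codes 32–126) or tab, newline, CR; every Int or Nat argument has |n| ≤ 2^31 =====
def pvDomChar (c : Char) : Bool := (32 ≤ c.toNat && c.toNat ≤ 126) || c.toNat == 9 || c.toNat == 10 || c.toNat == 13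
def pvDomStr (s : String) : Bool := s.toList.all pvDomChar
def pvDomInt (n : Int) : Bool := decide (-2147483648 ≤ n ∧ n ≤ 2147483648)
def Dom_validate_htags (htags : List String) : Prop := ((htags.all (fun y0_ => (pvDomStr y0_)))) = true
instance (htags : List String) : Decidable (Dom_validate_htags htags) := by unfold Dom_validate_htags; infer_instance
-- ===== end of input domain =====

-- B replaces A's four sequential passes (count, first-index search, pre-h1 slice loop, level-skip
-- slice loop) by ONE pass over htags that maintains the h1 count, a pre-h1 buffer and a skip buffer
-- at once, assembling the violation list at the end in A's order (objective: alternative).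

-- shared message text (identical f-string literals in both Pythons)
def pvMsgEmpty : String := "No heading tags found in the content."
def pvMsgNoH1 : String := "No <h1> tag found. Every page must have exactly one <h1>."
def pvMsgMany (n : Int) : String := "Found " ++ PySem.Int.toStr n ++ " <h1> tags. There must be exactly one <h1> per page."
def pvPreMsg (i : Int) (tag : String) : String :=
  "<" ++ tag ++ "> at position " ++ PySem.Int.toStr (i + 1) ++ " appears before the <h1>. All headings should follow the page's single <h1>."
def pvSkipMsg (prev cur : Int) : String :=
  "Heading level skipped: <h" ++ PySem.Int.toStr prev ++ "> followed directly by <h" ++ PySem.Int.toStr cur ++ "> — level <h" ++ PySem.Int.toStr (prev + 1) ++ "> is missing."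
-- int(tag[1]); default 0 is only reached where Python raises (excluded by Pre_)
def pvLevel (tag : String) : Int :=
  match PySem.Str.pyGet? tag 1 with
  | some c => (PySem.Int.ofChars? [c]).getD 0
  | none => 0

-- ===== PORT A =====
-- A's rule-2 loop body: one step of the level-skip walk (state = violations so far, prev level)
def pvStep (st : List String × Option Int) (tag : String) : List String × Option Int :=
  let current := pvLevel tag
  match st.2 with
  | some prev => (if prev + 1 < current then st.1 ++ [pvSkipMsg prev current] else st.1, some current)
  | none => (st.1, some current)

def validate_htags (htags : List String) : List String :=
  if htags = [] then [pvMsgEmpty]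
  else
    let h1_count : Nat := PySem.List.count htags "h1"
    let violations : List String :=
      if h1_count = 0 then [pvMsgNoH1]
      else if 1 < h1_count then [pvMsgMany (h1_count : Int)]
      else []
    let first_h1_idx : Nat :=
      match PySem.List.index? htags "h1" with
      | some i => i
      | none => htags.length
    -- htags[:first_h1_idx] / htags[first_h1_idx:] with this nonnegative index are take/drop
    -- (PySem.List.slice_to / slice_from)
    let violations := (PySem.List.enumerate (htags.take first_h1_idx)).foldl
      (fun acc p => acc ++ [pvPreMsg p.1 p.2]) violations
    ((htags.drop first_h1_idx).foldl pvStep (violations, none)).1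

-- ===== PORT B =====
-- B's single-pass step: state = (h1 count, pre-h1 buffer, skip buffer, prev level)
def pvBStep (st : Nat × List String × List String × Option Int) (p : Int × String) :
    Nat × List String × List String × Option Int :=
  let cnt := if p.2 = "h1" then st.1 + 1 else st.1
  if cnt = 0 then
    (cnt, st.2.1 ++ [pvPreMsg p.1 p.2], st.2.2.1, st.2.2.2)
  else
    let current := pvLevel p.2
    let skips :=
      match st.2.2.2 with
      | some prev => if prev + 1 < current then st.2.2.1 ++ [pvSkipMsg prev current] else st.2.2.1
      | none => st.2.2.1
    (cnt, st.2.1, skips, some current)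

def validate_htags_alt (htags : List String) : List String :=
  if htags = [] then [pvMsgEmpty]
  else
    let st := (PySem.List.enumerate htags).foldl pvBStep (0, [], [], none)
    let head : List String :=
      if st.1 = 0 then [pvMsgNoH1]
      else if 1 < st.1 then [pvMsgMany (st.1 : Int)]
      else []
    head ++ st.2.1 ++ st.2.2.1

-- ===== PRECONDITION & SPEC =====
def pvTagOk (t : String) : Bool :=
  match t.toList with
  | _ :: c :: _ => c.isDigit
  | _ => false
-- Pre_ excludes exactly the inputs on which A raises: from the first "h1" onward, int(tag[1])
-- raises IndexError/ValueError unless the tag has a decimal digit as its second character.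
def Pre_validate_htags (htags : List String) : Prop :=
  ((htags.drop ((PySem.List.index? htags "h1").getD htags.length)).all pvTagOk) = true
instance (htags : List String) : Decidable (Pre_validate_htags htags) := by unfold Pre_validate_htags; infer_instance
def pvWitness_validate_htags : List String := ["h3", "h1", "h2", "h4"]

def Spec_validate_htags (htags : List String) (out : List String) : Prop := out = validate_htags_alt htags
instance (htags : List String) (out : List String) : Decidable (Spec_validate_htags htags out) := by unfold Spec_validate_htags; infer_instance

-- ===== CLAIM (what is proved, stated in full; the proofs are below) =====
def Claim_equal_validate_htags : Prop := ∀ (htags : List String), Dom_validate_htags htags → Pre_validate_htags htags → Spec_validate_htags htags (validate_htags htags)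

-- ===== LEMMAS AND PROOFS =====

-- enumerate splits over ++
theorem pv_enumerate_append (xs ys : List String) (s : Int) :
    PySem.List.enumerate (xs ++ ys) s
      = PySem.List.enumerate xs s ++ PySem.List.enumerate ys (s + xs.length) := by
  induction xs generalizing s with
  | nil => simp [PySem.List.enumerate_nil]
  | cons x xs ih =>
    simp [PySem.List.enumerate_cons, ih (s + 1)]
    ring_nf

-- B's fold over a prefix with no "h1" just buffers pre-h1 messages
theorem pv_B_pre (pre : List String) (h : "h1" ∉ pre) (s : Int) (p sk : List String) (pv : Option Int) :
    (PySem.List.enumerate pre s).foldl pvBStep (0, p, sk, pv)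
      = (0, p ++ (PySem.List.enumerate pre s).map (fun q => pvPreMsg q.1 q.2), sk, pv) := by
  induction pre generalizing s p with
  | nil => simp [PySem.List.enumerate_nil]
  | cons t ts ih =>
    have ht : t ≠ "h1" := by intro he; exact h (he ▸ List.mem_cons_self)
    have hts : "h1" ∉ ts := fun hm => h (List.mem_cons_of_mem _ hm)
    simp [PySem.List.enumerate_cons, pvBStep, ht, ih hts (s + 1)]

-- B's fold after the first "h1" (count ≥ 1) runs A's rule-2 walk and counts the remaining h1s
theorem pv_B_post (r : List String) (s : Int) (c : Nat) (hc : c ≠ 0) (p sk : List String) (pv : Option Int) :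
    (PySem.List.enumerate r s).foldl pvBStep (c, p, sk, pv)
      = (c + r.count "h1", p, (r.foldl pvStep (sk, pv)).1, (r.foldl pvStep (sk, pv)).2) := by
  induction r generalizing s c sk pv with
  | nil => simp [PySem.List.enumerate_nil]
  | cons t ts ih =>
    rw [PySem.List.enumerate_cons, List.foldl_cons, List.foldl_cons]
    have hc' : (if t = "h1" then c + 1 else c) ≠ 0 := by
      by_cases h : t = "h1" <;> simp [h, hc]
    have hb : pvBStep (c, p, sk, pv) (s, t)
        = ((if t = "h1" then c + 1 else c), p, (pvStep (sk, pv) t).1, (pvStep (sk, pv) t).2) := by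
      cases pv <;> by_cases h : t = "h1" <;> simp [pvBStep, pvStep, h, hc]
    rw [hb, ih (s + 1) _ hc']
    simp only [Prod.mk.eta]
    have hcount : (if t = "h1" then c + 1 else c) + ts.count "h1" = c + (t :: ts).count "h1" := by
      by_cases h : t = "h1" <;> simp [h] <;> try omega
    rw [hcount]

-- A's rule-2 fold: the accumulator factors out of the walk
theorem pv_step_acc (r : List String) (v : List String) (pv : Option Int) :
    r.foldl pvStep (v, pv)
      = (v ++ (r.foldl pvStep ([], pv)).1, (r.foldl pvStep ([], pv)).2) := by
  induction r generalizing v pv with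
  | nil => simp
  | cons t ts ih =>
    have hsplit : ∀ w : List String, pvStep (w, pv) t
        = (w ++ (pvStep ([], pv) t).1, (pvStep ([], pv) t).2) := by
      intro w
      cases pv with
      | none => simp [pvStep]
      | some prev => by_cases h : prev + 1 < pvLevel t <;> simp [pvStep, h]
    rw [List.foldl_cons, List.foldl_cons, hsplit v, ih]
    conv_rhs => rw [← @Prod.mk.eta _ _ (pvStep ([], pv) t), ih]
    simp [List.append_assoc]

-- ===== VERDICT (by name: the statement is the Claim_ definition above) =====
theorem validate_htags_spec : Claim_equal_validate_htags := by
  intro htags _ _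
  unfold Spec_validate_htags validate_htags validate_htags_alt
  by_cases h0 : htags = []
  · simp [h0]
  · simp only [if_neg h0]
    cases hidx : PySem.List.index? htags "h1" with
    | none =>
      have hmem : "h1" ∉ htags := (PySem.List.index?_eq_none_iff htags "h1").1 hidx
      have hcnt : PySem.List.count htags "h1" = 0 := by
        simp [PySem.List.count_eq, List.count_eq_zero_of_not_mem hmem]
      simp only [hcnt]
      rw [List.take_length, List.drop_length]
      rw [pv_B_pre htags hmem 0 [] [] none]
      rw [PySem.List.foldl_append_singleton_eq_map (fun q : Int × String => pvPreMsg q.1 q.2)]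
      simp
    | some i =>
      obtain ⟨pre, suf, heq, hlen, hpre⟩ := (PySem.List.index?_eq_some_iff htags "h1" i).1 hidx
      subst heq
      have hcnt : PySem.List.count (pre ++ "h1" :: suf) "h1" = suf.count "h1" + 1 := by
        simp [PySem.List.count_eq, List.count_append, List.count_eq_zero_of_not_mem hpre]
      have htake : (pre ++ "h1" :: suf).take i = pre := by
        rw [← hlen]; simp
      have hdrop : (pre ++ "h1" :: suf).drop i = "h1" :: suf := by
        rw [← hlen]; simp
      simp only [hcnt, htake, hdrop]
      -- B side: split the single pass at the first h1
      rw [pv_enumerate_append pre ("h1" :: suf) 0]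
      simp only [List.foldl_append, PySem.List.enumerate_cons, List.foldl_cons]
      rw [pv_B_pre pre hpre 0 [] [] none]
      have h1step : pvBStep (0, [] ++ (PySem.List.enumerate pre 0).map (fun q => pvPreMsg q.1 q.2), [], none)
          ((0 + (pre.length : Int)), "h1")
          = (1, [] ++ (PySem.List.enumerate pre 0).map (fun q => pvPreMsg q.1 q.2), [], some (pvLevel "h1")) := by
        simp [pvBStep]
      rw [h1step]
      rw [pv_B_post suf (0 + (pre.length : Int) + 1) 1 (by omega) _ [] (some (pvLevel "h1"))]
      -- A side
      rw [PySem.List.foldl_append_singleton_eq_map (fun q : Int × String => pvPreMsg q.1 q.2)]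
      have hA : ∀ v : List String, pvStep (v, none) "h1" = (v, some (pvLevel "h1")) := by
        intro v; simp [pvStep]
      rw [hA]
      rw [pv_step_acc suf _ (some (pvLevel "h1"))]
      simp [Nat.one_add, List.append_assoc]
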